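-- pv_equiv track=rewrite | github.com/seba-velarde19/Fundamentos | fundamentos/TPS/TP2 termina hoy/algo_twitte1r.py | eliminar_tokenizaciones
-- ===== SOURCE A (Python) =====
-- def eliminar_tokenizaciones(eliminar, diccionario):
--     """recibe el set con los ids para eliminar y el diccionario de las
--     tokenizaciones.
--
--     elimina del diccionario aquellos tokens que contengan algun id en
--     sus valores, devuelve el diccionario modificado."""
--
--     claves_a_eliminar = []
--
--     for token, ids in diccionario.items():
--         for id in list(eliminar):
--             if id in ids:
--                 ids.remove(id)
--         if not ids:
--             claves_a_eliminar.append(token)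
--
--     for clave in claves_a_eliminar:
--         diccionario.pop(clave)
--
--     return diccionario
-- ===== SOURCE B (Python) =====
-- def eliminar_tokenizaciones(eliminar, diccionario):
--     """Build a multiplicity budget of the ids to remove once; then each ids
--     list is filtered in a single pass, counting in `usado` how many of each
--     id were already skipped, keeping an id once its budget is used up.
--     Mutates `diccionario` in place like the original (ids lists rewritten via
--     slice assignment, empty tokens popped)."""
--     presupuesto = {}
--     for id in eliminar:
--         presupuesto[id] = presupuesto.get(id, 0) + 1
--
--     claves_a_eliminar = []
--     for token, ids in diccionario.items():
--         usado = {}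
--         nuevos = []
--         for x in ids:
--             if usado.get(x, 0) < presupuesto.get(x, 0):
--                 usado[x] = usado.get(x, 0) + 1
--             else:
--                 nuevos.append(x)
--         ids[:] = nuevos
--         if not nuevos:
--             claves_a_eliminar.append(token)
--
--     for clave in claves_a_eliminar:
--         diccionario.pop(clave)
--
--     return diccionario
-- ===== Notes on version B (the rewrite author's own statement) =====
-- stated objective: faster
-- what changed: Replaces A's nested loop over eliminar with repeated 'in'/'remove' scans of each ids list by a multiplicity budget dict built once and a single counting pass over each ids list.
import Mathlib
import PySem

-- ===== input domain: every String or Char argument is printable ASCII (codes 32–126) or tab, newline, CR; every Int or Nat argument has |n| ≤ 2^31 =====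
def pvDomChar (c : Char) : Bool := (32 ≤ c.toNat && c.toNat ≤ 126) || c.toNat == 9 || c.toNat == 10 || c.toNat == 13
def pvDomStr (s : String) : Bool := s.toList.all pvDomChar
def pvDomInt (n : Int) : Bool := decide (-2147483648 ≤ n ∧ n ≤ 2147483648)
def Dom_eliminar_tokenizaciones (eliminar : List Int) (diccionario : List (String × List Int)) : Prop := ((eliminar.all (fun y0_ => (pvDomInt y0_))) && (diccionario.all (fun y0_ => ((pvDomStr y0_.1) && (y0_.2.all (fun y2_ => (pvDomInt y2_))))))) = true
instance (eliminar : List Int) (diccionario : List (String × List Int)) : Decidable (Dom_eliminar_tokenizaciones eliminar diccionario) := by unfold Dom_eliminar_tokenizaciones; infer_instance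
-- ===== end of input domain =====

-- B replaces A's nested remove-scan over `eliminar` by a multiplicity budget built once
-- and a single filtering pass over each ids list (objective: faster).
-- Both Pythons mutate `diccionario` in place; the equivalence proved here is about the return value.

-- ===== PORT A =====
-- for id in list(eliminar): if id in ids: ids.remove(id)
def pvRemoveLoop (eliminar : List Int) (ids : List Int) : List Int :=
  eliminar.foldl (fun ids id =>
    if ids.contains id then (PySem.List.remove? ids id).getD ids else ids) ids

-- diccionario.pop(clave): remove the first entry with that key (always present when A calls it)
def pvPopKey (d : List (String × List Int)) (k : String) : List (String × List Int) :=
  match d with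
  | [] => []
  | p :: rest => if p.1 == k then rest else p :: pvPopKey rest k

def eliminar_tokenizaciones (eliminar : List Int) (diccionario : List (String × List Int)) : List (String × List Int) :=
  let processed := diccionario.map (fun p => (p.1, pvRemoveLoop eliminar p.2))
  let claves_a_eliminar := processed.foldl
    (fun acc p => if p.2.isEmpty then acc ++ [p.1] else acc) ([] : List String)
  claves_a_eliminar.foldl pvPopKey processed

-- ===== PORT B =====
-- presupuesto[id] = presupuesto.get(id, 0) + 1
def pvBudget (eliminar : List Int) : PySem.Dict Int Int :=
  eliminar.foldl (fun d id => d.insert id (d.getD id 0 + 1)) PySem.Dict.empty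

-- the per-token single pass over ids with loop variables usado, nuevos
def pvFilterLoop (presupuesto usado : PySem.Dict Int Int) (nuevos : List Int) : List Int → List Int
  | [] => nuevos
  | x :: xs =>
    if usado.getD x 0 < presupuesto.getD x 0 then
      pvFilterLoop presupuesto (usado.insert x (usado.getD x 0 + 1)) nuevos xs
    else pvFilterLoop presupuesto usado (nuevos ++ [x]) xs

def pvFilterPass (presupuesto : PySem.Dict Int Int) (ids : List Int) : List Int :=
  pvFilterLoop presupuesto PySem.Dict.empty [] ids

def eliminar_tokenizaciones_alt (eliminar : List Int) (diccionario : List (String × List Int)) : List (String × List Int) :=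
  let presupuesto := pvBudget eliminar
  let processed := diccionario.map (fun p => (p.1, pvFilterPass presupuesto p.2))
  let claves_a_eliminar := processed.foldl
    (fun acc p => if p.2.isEmpty then acc ++ [p.1] else acc) ([] : List String)
  claves_a_eliminar.foldl pvPopKey processed

-- ===== PRECONDITION & SPEC =====
def Spec_eliminar_tokenizaciones (eliminar : List Int) (diccionario : List (String × List Int)) (out : List (String × List Int)) : Prop := out = eliminar_tokenizaciones_alt eliminar diccionario
instance (eliminar : List Int) (diccionario : List (String × List Int)) (out : List (String × List Int)) : Decidable (Spec_eliminar_tokenizaciones eliminar diccionario out) := by unfold Spec_eliminar_tokenizaciones; infer_instance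

-- ===== CLAIM (what is proved, stated in full; the proofs are below) =====
def Claim_equal_eliminar_tokenizaciones : Prop := ∀ (eliminar : List Int) (diccionario : List (String × List Int)), Dom_eliminar_tokenizaciones eliminar diccionario → Spec_eliminar_tokenizaciones eliminar diccionario (eliminar_tokenizaciones eliminar diccionario)

-- ===== LEMMAS AND PROOFS =====

-- specification of both per-token passes: drop the first `c x` occurrences of each x
def dropCounted (c : Int → Int) : List Int → List Int
  | [] => []
  | x :: xs => if 0 < c x then dropCounted (fun y => if y = x then c x - 1 else c y) xs
               else x :: dropCounted c xs

theorem dropCounted_nonpos (c : Int → Int) (h : ∀ y, c y ≤ 0) (ids : List Int) :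
    dropCounted c ids = ids := by
  induction ids with
  | nil => rfl
  | cons x xs ih => simp [dropCounted, not_lt.2 (h x), ih]

-- removing one first-occurrence and then dropCounted c = dropCounted with c bumped at e
theorem dropCounted_remove (c : Int → Int) (hc : ∀ y, 0 ≤ c y) (e : Int) (ids : List Int) :
    dropCounted c (if ids.contains e then (PySem.List.remove? ids e).getD ids else ids)
      = dropCounted (fun y => if y = e then c y + 1 else c y) ids := by
  induction ids generalizing c with
  | nil => rfl
  | cons x xs ih =>
    by_cases hx : x = e
    · subst hx
      simp only [List.contains_cons, beq_self_eq_true, Bool.true_or, if_true,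
        PySem.List.remove?_cons_self, Option.getD_some]
      rw [dropCounted]
      have hpos : 0 < (if x = x then c x + 1 else c x) := by simp; linarith [hc x]
      rw [if_pos hpos]
      congr 1
      funext y
      by_cases hy : y = x <;> simp [hy]
    · have hne : (x == e) = false := by simp [hx]
      have hstep : (if (x :: xs).contains e then (PySem.List.remove? (x :: xs) e).getD (x :: xs) else (x :: xs))
          = x :: (if xs.contains e then (PySem.List.remove? xs e).getD xs else xs) := by
        by_cases hm : xs.contains e
        · have hmem : e ∈ xs := by simpa using hm
          have hmem' : e ∈ x :: xs := List.mem_cons_of_mem _ hmem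
          rw [if_pos (by simpa using hmem'), if_pos (by simpa using hmem),
              PySem.List.remove?_eq_some_erase (x :: xs) e hmem', PySem.List.remove?_eq_some_erase xs e hmem,
              Option.getD_some, Option.getD_some, List.erase_cons_tail]
          intro h
          exact hx (by simpa using h)
        · have h1 : e ∉ xs := by simpa using hm
          have h2 : e ∉ x :: xs := by
            intro h
            rcases List.mem_cons.mp h with h | h
            · exact hx h.symm
            · exact h1 h
          rw [if_neg (by simpa using h2), if_neg (by simpa using h1)]
      rw [hstep, dropCounted, dropCounted]
      by_cases hcx : 0 < c x
      · rw [if_pos hcx]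
        have hcx' : 0 < (if x = e then c x + 1 else c x) := by simp [hx, hcx]
        rw [if_pos hcx']
        have ih' := ih (fun y => if y = x then c x - 1 else c y)
          (by intro y; by_cases hy : y = x <;> simp [hy] <;> [linarith [hcx]; exact hc y])
        rw [ih']
        congr 1
        funext y
        by_cases hy : y = x <;> by_cases hye : y = e <;> simp_all
      · rw [if_neg hcx]
        have hcx' : ¬ 0 < (if x = e then c x + 1 else c x) := by simp [hx, hcx]
        rw [if_neg hcx', ih c hc]

-- A's per-token loop computes dropCounted with the multiplicity of eliminar
theorem removeLoop_eq_dropCounted (eliminar ids : List Int) :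
    pvRemoveLoop eliminar ids = dropCounted (fun v => (eliminar.count v : Int)) ids := by
  induction eliminar generalizing ids with
  | nil =>
    simp only [pvRemoveLoop, List.foldl_nil]
    rw [dropCounted_nonpos _ (by intro y; simp [List.count_nil])]
  | cons e es ih =>
    simp only [pvRemoveLoop, List.foldl_cons] at *
    rw [ih, dropCounted_remove _ (by intro y; positivity)]
    congr 1
    funext y
    by_cases hy : y = e
    · simp [hy]
    · have hy' : ¬ e = y := fun h => hy h.symm
      simp [hy, hy']

-- B's per-token single pass computes the same dropCounted
theorem filterLoop_eq_dropCounted (ids : List Int) (presupuesto usado : PySem.Dict Int Int) (nuevos : List Int) :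
    pvFilterLoop presupuesto usado nuevos ids
      = nuevos ++ dropCounted (fun v => presupuesto.getD v 0 - usado.getD v 0) ids := by
  induction ids generalizing usado nuevos with
  | nil => simp [pvFilterLoop, dropCounted]
  | cons x xs ih =>
    rw [pvFilterLoop]
    by_cases h : usado.getD x 0 < presupuesto.getD x 0
    · rw [if_pos h, ih, dropCounted, if_pos (by omega : (0 : Int) < presupuesto.getD x 0 - usado.getD x 0)]
      congr 2
      funext y
      rw [PySem.Dict.getD_insert]
      by_cases hy : y = x
      · subst hy
        rw [if_pos rfl, if_pos rfl]
        ring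
      · rw [if_neg hy, if_neg hy]
    · rw [if_neg h, ih, dropCounted,
          if_neg (by omega : ¬ (0 : Int) < presupuesto.getD x 0 - usado.getD x 0)]
      simp
-- ===== VERDICT (by name: the statement is the Claim_ definition above) =====
theorem eliminar_tokenizaciones_spec : Claim_equal_eliminar_tokenizaciones := by
  intro eliminar diccionario _
  show _ = _
  unfold eliminar_tokenizaciones eliminar_tokenizaciones_alt
  have hmap : diccionario.map (fun p => (p.1, pvRemoveLoop eliminar p.2))
      = diccionario.map (fun p => (p.1, pvFilterPass (pvBudget eliminar) p.2)) := by
    apply List.map_congr_left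
    intro p _
    have : pvFilterPass (pvBudget eliminar) p.2
        = dropCounted (fun v => (eliminar.count v : Int)) p.2 := by
      unfold pvFilterPass
      rw [filterLoop_eq_dropCounted]
      simp only [List.nil_append]
      congr 1
      funext v
      rw [PySem.Dict.getD_empty, sub_zero,
          pvBudget, PySem.Dict.foldl_insert_getD_add_one_eq_counter, PySem.Dict.getD_counter]
    rw [removeLoop_eq_dropCounted, this]
  rw [hmap]
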